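-- pv_equiv track=rewrite | github.com/EduardoAndreu/clean-cut | python-backend/silence_detector_vad.py | find_non_speech_regions
-- ===== SOURCE A (Python) =====
-- def find_non_speech_regions(speech_frames, min_silence_ms=500, frame_duration_ms=30):
--     """
--     Convert VAD frame results into continuous non-speech regions.
--     """
--     if not speech_frames:
--         return []
--
--     non_speech_regions = []
--     current_start = None
--     min_frames = max(1, int(min_silence_ms / frame_duration_ms))
--
--     # Group consecutive non-speech frames
--     consecutive_non_speech = 0
--
--     for timestamp_ms, is_speech in speech_frames:
--         if not is_speech:
--             if current_start is None:
--                 current_start = timestamp_ms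
--                 consecutive_non_speech = 1
--             else:
--                 consecutive_non_speech += 1
--         else:
--             # Speech detected - end current non-speech region if long enough
--             if current_start is not None and consecutive_non_speech >= min_frames:
--                 end_time = timestamp_ms
--                 non_speech_regions.append((current_start, end_time))
--
--             current_start = None
--             consecutive_non_speech = 0
--
--     # Handle final region if audio ends with non-speech
--     if current_start is not None and consecutive_non_speech >= min_frames:
--         final_timestamp = speech_frames[-1][0] + frame_duration_ms
--         non_speech_regions.append((current_start, final_timestamp))
--
--     return non_speech_regions
-- ===== SOURCE B (Python) =====
-- def find_non_speech_regions(speech_frames, min_silence_ms=500, frame_duration_ms=30):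
--     if not speech_frames:
--         return []
--     min_frames = max(1, int(min_silence_ms / frame_duration_ms))
--     # group frames into maximal consecutive runs by their is_speech flag
--     runs = []
--     for ts, is_speech in speech_frames:
--         if runs and runs[-1][0] == is_speech:
--             runs[-1][1].append(ts)
--         else:
--             runs.append((is_speech, [ts]))
--     regions = []
--     # iterate over runs with lookahead to the next run
--     for (is_speech, tss), nxt in zip(runs, runs[1:] + [None]):
--         if not is_speech and len(tss) >= min_frames:
--             end = nxt[1][0] if nxt is not None else tss[-1] + frame_duration_ms
--             regions.append((tss[0], end))
--     return regions
-- ===== Notes on version B (the rewrite author's own statement) =====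
-- stated objective: alternative
-- what changed: B first groups the frames into maximal consecutive runs by their is_speech flag, then emits one region per sufficiently long non-speech run using lookahead to the next run, instead of A's single-pass state machine with current_start/consecutive counters.
import Mathlib
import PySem

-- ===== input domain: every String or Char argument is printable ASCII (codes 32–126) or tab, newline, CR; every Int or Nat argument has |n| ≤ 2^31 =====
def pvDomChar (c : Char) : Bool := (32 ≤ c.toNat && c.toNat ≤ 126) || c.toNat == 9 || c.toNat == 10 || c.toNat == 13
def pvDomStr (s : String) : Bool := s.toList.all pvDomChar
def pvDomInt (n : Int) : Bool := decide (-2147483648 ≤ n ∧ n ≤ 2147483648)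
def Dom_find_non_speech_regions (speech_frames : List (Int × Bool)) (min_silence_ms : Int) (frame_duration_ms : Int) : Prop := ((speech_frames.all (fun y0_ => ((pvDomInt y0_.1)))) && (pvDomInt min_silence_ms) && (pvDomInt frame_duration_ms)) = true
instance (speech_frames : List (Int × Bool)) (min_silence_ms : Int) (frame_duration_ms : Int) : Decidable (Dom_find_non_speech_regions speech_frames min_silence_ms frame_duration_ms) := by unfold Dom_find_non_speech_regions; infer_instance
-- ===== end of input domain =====

-- B groups frames into maximal consecutive runs by is_speech and emits regions with
-- lookahead to the next run, instead of A's single-pass state machine (objective: alternative).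

-- ===== PORT A =====
-- one loop iteration of A: state = (non_speech_regions, current_start, consecutive_non_speech)
def pvStepA (min_frames : Int) (st : List (Int × Int) × Option Int × Int) (fr : Int × Bool) :
    List (Int × Int) × Option Int × Int :=
  if fr.2 = false then
    match st.2.1 with
    | none => (st.1, some fr.1, 1)
    | some s => (st.1, some s, st.2.2 + 1)
  else
    match st.2.1 with
    | some s => if st.2.2 ≥ min_frames then (st.1 ++ [(s, fr.1)], none, 0) else (st.1, none, 0)
    | none => (st.1, none, 0)

def find_non_speech_regions (speech_frames : List (Int × Bool)) (min_silence_ms : Int) (frame_duration_ms : Int) : List (Int × Int) :=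
  if speech_frames = [] then []
  else
    -- int(min_silence_ms / frame_duration_ms): for |arguments| ≤ 2^31 Python's float division
    -- followed by int() equals exact truncating integer division, Int.tdiv
    let min_frames := max 1 (min_silence_ms.tdiv frame_duration_ms)
    let st := speech_frames.foldl (pvStepA min_frames) ([], none, 0)
    match st.2.1 with
    | some s =>
      if st.2.2 ≥ min_frames then
        -- speech_frames[-1][0]: the list is nonempty here, so pyGet? (-1) returns a value
        st.1 ++ [(s, ((PySem.List.pyGet? speech_frames (-1)).getD (0, false)).1 + frame_duration_ms)]
      else st.1
    | none => st.1

-- ===== PORT B =====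
-- one iteration of B's grouping loop: extend the last run or open a new one
def pvStepRuns (runs : List (Bool × List Int)) (fr : Int × Bool) : List (Bool × List Int) :=
  match runs.getLast? with
  | some lastRun =>
    if lastRun.1 = fr.2 then runs.dropLast ++ [(lastRun.1, lastRun.2 ++ [fr.1])]
    else runs ++ [(fr.2, [fr.1])]
  | none => [(fr.2, [fr.1])]

-- one iteration of B's emission loop over (run, lookahead) pairs
def pvStepEmit (min_frames frame_duration_ms : Int) (regions : List (Int × Int))
    (rp : (Bool × List Int) × Option (Bool × List Int)) : List (Int × Int) :=
  if rp.1.1 = false ∧ (rp.1.2.length : Int) ≥ min_frames then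
    match rp.2 with
    | some nxt => regions ++ [(rp.1.2.headD 0, nxt.2.headD 0)]
    | none => regions ++ [(rp.1.2.headD 0, rp.1.2.getLastD 0 + frame_duration_ms)]
  else regions

def find_non_speech_regions_alt (speech_frames : List (Int × Bool)) (min_silence_ms : Int) (frame_duration_ms : Int) : List (Int × Int) :=
  if speech_frames = [] then []
  else
    let min_frames := max 1 (min_silence_ms.tdiv frame_duration_ms)
    let runs := speech_frames.foldl pvStepRuns []
    (runs.zip ((runs.drop 1).map some ++ [none])).foldl (pvStepEmit min_frames frame_duration_ms) []

-- ===== PRECONDITION & SPEC =====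
-- Pre_ excludes only frame_duration_ms = 0 with a nonempty frame list, where A (and B) raise ZeroDivisionError.
def Pre_find_non_speech_regions (speech_frames : List (Int × Bool)) (min_silence_ms : Int) (frame_duration_ms : Int) : Prop :=
  speech_frames = [] ∨ frame_duration_ms ≠ 0
instance (speech_frames : List (Int × Bool)) (min_silence_ms : Int) (frame_duration_ms : Int) : Decidable (Pre_find_non_speech_regions speech_frames min_silence_ms frame_duration_ms) := by unfold Pre_find_non_speech_regions; infer_instance

def pvWitness_find_non_speech_regions : (List (Int × Bool)) × Int × Int :=
  ([(0, false), (30, false), (60, true), (90, false)], 60, 30)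

def Spec_find_non_speech_regions (speech_frames : List (Int × Bool)) (min_silence_ms : Int) (frame_duration_ms : Int) (out : List (Int × Int)) : Prop := out = find_non_speech_regions_alt speech_frames min_silence_ms frame_duration_ms
instance (speech_frames : List (Int × Bool)) (min_silence_ms : Int) (frame_duration_ms : Int) (out : List (Int × Int)) : Decidable (Spec_find_non_speech_regions speech_frames min_silence_ms frame_duration_ms out) := by unfold Spec_find_non_speech_regions; infer_instance

-- ===== CLAIM (what is proved, stated in full; the proofs are below) =====
def Claim_equal_find_non_speech_regions : Prop := ∀ (speech_frames : List (Int × Bool)) (min_silence_ms : Int) (frame_duration_ms : Int), Dom_find_non_speech_regions speech_frames min_silence_ms frame_duration_ms → Pre_find_non_speech_regions speech_frames min_silence_ms frame_duration_ms → Spec_find_non_speech_regions speech_frames min_silence_ms frame_duration_ms (find_non_speech_regions speech_frames min_silence_ms frame_duration_ms)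

-- ===== LEMMAS AND PROOFS =====

-- emission for a single run given its lookahead
def pvEmit (mf fd : Int) (r : Bool × List Int) (nxt : Option (Bool × List Int)) : List (Int × Int) :=
  if r.1 = false ∧ (r.2.length : Int) ≥ mf then
    match nxt with
    | some n => [(r.2.headD 0, n.2.headD 0)]
    | none => [(r.2.headD 0, r.2.getLastD 0 + fd)]
  else []

-- regions emitted by B's loop, written as structural recursion with lookahead
def pvPsi (mf fd : Int) : List (Bool × List Int) → List (Int × Int)
  | [] => []
  | [r] => pvEmit mf fd r none
  | r1 :: r2 :: rest => pvEmit mf fd r1 (some r2) ++ pvPsi mf fd (r2 :: rest)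

-- like pvPsi but the final (unterminated) run emits nothing: A's regions while still looping
def pvPhi (mf fd : Int) : List (Bool × List Int) → List (Int × Int)
  | [] => []
  | [_] => []
  | r1 :: r2 :: rest => pvEmit mf fd r1 (some r2) ++ pvPhi mf fd (r2 :: rest)

-- A's (current_start, consecutive) as a function of the runs so far
def pvLastState (runs : List (Bool × List Int)) : Option Int × Int :=
  match runs.getLast? with
  | some (false, tss) => (some (tss.headD 0), (tss.length : Int))
  | _ => (none, 0)

theorem pvStepEmit_eq (mf fd : Int) (acc : List (Int × Int)) (rp) :
    pvStepEmit mf fd acc rp = acc ++ pvEmit mf fd rp.1 rp.2 := by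
  unfold pvStepEmit pvEmit
  split_ifs <;> cases rp.2 <;> simp

theorem pvFoldEmit_eq (mf fd : Int) (l : List ((Bool × List Int) × Option (Bool × List Int)))
    (acc : List (Int × Int)) :
    l.foldl (pvStepEmit mf fd) acc = acc ++ l.foldl (pvStepEmit mf fd) [] := by
  induction l generalizing acc with
  | nil => simp
  | cons x xs ih =>
    simp only [List.foldl_cons]
    rw [ih, ih (pvStepEmit mf fd [] x), pvStepEmit_eq, pvStepEmit_eq]
    simp

theorem pvZipfold_eq_psi (mf fd : Int) (runs : List (Bool × List Int)) :
    (runs.zip ((runs.drop 1).map some ++ [none])).foldl (pvStepEmit mf fd) [] = pvPsi mf fd runs := by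
  induction runs with
  | nil => simp [pvPsi]
  | cons r rest ih =>
    cases rest with
    | nil => simp [pvPsi, pvStepEmit_eq]
    | cons r2 rest2 =>
      simp only [List.drop_one, List.tail_cons, List.map_cons, List.cons_append,
        List.zip_cons_cons, List.foldl_cons] at ih ⊢
      rw [pvFoldEmit_eq, pvStepEmit_eq, ih]
      simp [pvPsi]

theorem pvPhi_snoc2 (mf fd : Int) (rs : List (Bool × List Int)) (r r' : Bool × List Int) :
    pvPhi mf fd (rs ++ [r] ++ [r']) = pvPhi mf fd (rs ++ [r]) ++ pvEmit mf fd r (some r') := by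
  induction rs with
  | nil => simp [pvPhi]
  | cons x xs ih =>
    cases xs with
    | nil => simp [pvPhi]
    | cons y ys => simp only [List.cons_append, pvPhi] at ih ⊢; rw [ih]; simp

theorem pvPhi_last_congr (mf fd : Int) (rs : List (Bool × List Int)) (r r' : Bool × List Int)
    (h : r.2.headD 0 = r'.2.headD 0) :
    pvPhi mf fd (rs ++ [r]) = pvPhi mf fd (rs ++ [r']) := by
  have h' : r.2.head?.getD 0 = r'.2.head?.getD 0 := by simpa using h
  induction rs with
  | nil => simp [pvPhi]
  | cons x xs ih =>
    cases xs with
    | nil => simp [pvPhi, pvEmit, h']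
    | cons y ys => simp only [List.cons_append, pvPhi] at ih ⊢; rw [ih]

theorem pvPsi_eq_phi (mf fd : Int) (rs : List (Bool × List Int)) (r : Bool × List Int) :
    pvPsi mf fd (rs ++ [r]) = pvPhi mf fd (rs ++ [r]) ++ pvEmit mf fd r none := by
  induction rs with
  | nil => simp [pvPsi, pvPhi]
  | cons x xs ih =>
    cases xs with
    | nil => simp [pvPsi, pvPhi]
    | cons y ys => simp only [List.cons_append, pvPsi, pvPhi] at ih ⊢; rw [ih]; simp

theorem pvLastState_snoc (rs : List (Bool × List Int)) (b : Bool) (tss : List Int) :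
    pvLastState (rs ++ [(b, tss)]) =
      if b = false then (some (tss.headD 0), (tss.length : Int)) else (none, 0) := by
  unfold pvLastState
  rw [List.getLast?_concat]
  cases b <;> simp

theorem pvStepRuns_snoc (rs : List (Bool × List Int)) (r : Bool × List Int) (x : Int × Bool) :
    pvStepRuns (rs ++ [r]) x =
      if r.1 = x.2 then rs ++ [(r.1, r.2 ++ [x.1])] else rs ++ [r] ++ [(x.2, [x.1])] := by
  unfold pvStepRuns
  rw [List.getLast?_concat, List.dropLast_concat]

-- the coupling invariant between A's fold state and B's runs
theorem pvInv (mf fd : Int) (l : List (Int × Bool)) :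
    (l.foldl (pvStepA mf) ([], none, 0)).1 = pvPhi mf fd (l.foldl pvStepRuns [])
    ∧ (l.foldl (pvStepA mf) ([], none, 0)).2 = pvLastState (l.foldl pvStepRuns [])
    ∧ (l.foldl pvStepRuns [] = [] ↔ l = [])
    ∧ (∀ r ∈ l.foldl pvStepRuns [], r.2 ≠ [])
    ∧ ((l.foldl pvStepRuns []).getLast?).map (fun r => r.2.getLastD 0) = (l.getLast?).map Prod.fst := by
  induction l using List.reverseRecOn with
  | nil => simp [pvPhi, pvLastState]
  | append_singleton xs x ih =>
    obtain ⟨h1, h2, h3, h4, h5⟩ := ih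
    obtain ⟨t, b⟩ := x
    simp only [List.foldl_append, List.foldl_cons, List.foldl_nil]
    rcases List.eq_nil_or_concat (xs.foldl pvStepRuns []) with hn | ⟨rs, r, hr⟩
    · -- xs = []
      have hx : xs = [] := h3.mp hn
      subst hx
      cases b <;> simp [pvStepA, pvStepRuns, pvPhi, pvLastState, pvEmit]
    · rw [List.concat_eq_append] at hr
      obtain ⟨rb, tss⟩ := r
      have hxs : xs ≠ [] := fun h => by rw [h] at hr; simp at hr
      have htss : tss ≠ [] := by
        have := h4 (rb, tss) (by rw [hr]; simp)
        simpa using this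
      have hlastTs : some (tss.getLastD 0) = xs.getLast?.map Prod.fst := by
        rw [hr] at h5
        rw [← h5, List.getLast?_concat]
        simp
      rw [hr] at h1 h2
      rw [pvLastState_snoc] at h2
      rw [hr, pvStepRuns_snoc]
      -- A's state components
      rcases hSt : xs.foldl (pvStepA mf) ([], (none : Option Int), (0 : Int)) with ⟨regs, cs, c⟩
      rw [hSt] at h1 h2
      simp only at h1 h2
      have hheadD : (tss ++ [t]).headD 0 = tss.headD 0 := by
        cases tss with
        | nil => exact absurd rfl htss
        | cons a as => simp
      cases rb <;> cases b
      · -- extend a non-speech run with a non-speech frame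
        simp only [if_pos rfl] at h2 ⊢
        have hcs : cs = some (tss.headD 0) := by simpa using congrArg Prod.fst h2
        have hc : c = (tss.length : Int) := by simpa using congrArg Prod.snd h2
        refine ⟨?_, ?_, ?_, ?_, ?_⟩
        · simp [pvStepA, hcs, h1,
            pvPhi_last_congr mf fd rs (false, tss ++ [t]) (false, tss) (by simpa using hheadD)]
        · obtain ⟨a, as, rfl⟩ : ∃ a as, tss = a :: as := by
            cases tss with
            | nil => exact absurd rfl htss
            | cons a as => exact ⟨a, as, rfl⟩
          simp [pvStepA, hcs, hc, pvLastState_snoc]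
        · constructor
          · intro h; simp at h
          · intro h; simp at h
        · intro q hq
          rcases List.mem_append.mp hq with hq | hq
          · exact h4 q (by rw [hr]; exact List.mem_append.mpr (Or.inl hq))
          · simp at hq; rw [hq]; simp
        · rw [List.getLast?_concat]
          simp [List.getLast?_concat]
      · -- non-speech run followed by a speech frame: possible emission, new run
        simp only [Bool.false_eq_true, if_false] at h2 ⊢
        have hcs : cs = some (tss.headD 0) := by simpa using congrArg Prod.fst h2
        have hc : c = (tss.length : Int) := by simpa using congrArg Prod.snd h2
        refine ⟨?_, ?_, ?_, ?_, ?_⟩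
        · rw [pvPhi_snoc2]
          simp only [pvStepA, hcs, hc, h1, pvEmit]
          by_cases hge : ((tss.length : Int)) ≥ mf
          · simp [hge]
          · simp [hge]
        · rw [pvLastState_snoc]
          simp only [pvStepA, hcs]
          split_ifs <;> simp_all
        · constructor
          · intro h; simp at h
          · intro h; simp at h
        · intro q hq
          rcases List.mem_append.mp hq with hq | hq
          · exact h4 q (by rw [hr]; exact hq)
          · simp at hq; rw [hq]; simp
        · rw [List.getLast?_concat]; simp
      · -- speech run followed by a non-speech frame: new run opened
        simp only [Bool.true_eq_false, if_false] at h2 ⊢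
        have hcs : cs = none := by simpa using congrArg Prod.fst h2
        refine ⟨?_, ?_, ?_, ?_, ?_⟩
        · rw [pvPhi_snoc2]
          simp [pvStepA, hcs, h1, pvEmit]
        · rw [pvLastState_snoc]
          simp [pvStepA, hcs]
        · constructor
          · intro h; simp at h
          · intro h; simp at h
        · intro q hq
          rcases List.mem_append.mp hq with hq | hq
          · exact h4 q (by rw [hr]; exact hq)
          · simp at hq; rw [hq]; simp
        · rw [List.getLast?_concat]; simp
      · -- extend a speech run with a speech frame: nothing changes for A
        simp only [if_pos rfl] at h2 ⊢
        have hcs : cs = none := by simpa using congrArg Prod.fst h2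
        refine ⟨?_, ?_, ?_, ?_, ?_⟩
        · simp [pvStepA, hcs, h1,
            pvPhi_last_congr mf fd rs (true, tss ++ [t]) (true, tss) (by simpa using hheadD)]
        · simp [pvStepA, hcs, pvLastState_snoc]
        · constructor
          · intro h; simp at h
          · intro h; simp at h
        · intro q hq
          rcases List.mem_append.mp hq with hq | hq
          · exact h4 q (by rw [hr]; exact List.mem_append.mpr (Or.inl hq))
          · simp at hq; rw [hq]; simp
        · rw [List.getLast?_concat]
          simp [List.getLast?_concat]

-- ===== VERDICT (by name: the statement is the Claim_ definition above) =====
theorem find_non_speech_regions_spec : Claim_equal_find_non_speech_regions := by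
  intro l ms fd _ _
  unfold Spec_find_non_speech_regions find_non_speech_regions find_non_speech_regions_alt
  by_cases hl : l = []
  · simp [hl]
  · simp only [hl, if_false]
    set mf := max 1 (ms.tdiv fd) with hmf
    obtain ⟨h1, h2, h3, h4, h5⟩ := pvInv mf fd l
    rw [pvZipfold_eq_psi]
    rcases List.eq_nil_or_concat (l.foldl pvStepRuns []) with hn | ⟨rs, r, hr⟩
    · exact absurd (h3.mp hn) hl
    · rw [List.concat_eq_append] at hr
      obtain ⟨rb, tss⟩ := r
      have htss : tss ≠ [] := by
        have := h4 (rb, tss) (by rw [hr]; simp)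
        simpa using this
      have hlastTs : some (tss.getLastD 0) = l.getLast?.map Prod.fst := by
        rw [hr] at h5
        rw [← h5, List.getLast?_concat]
        simp
      rw [hr] at h1 h2 ⊢
      rw [pvLastState_snoc] at h2
      rw [pvPsi_eq_phi, ← h1]
      have hfin : ((PySem.List.pyGet? l (-1)).getD (0, false)).1 = tss.getLastD 0 := by
        rw [PySem.List.pyGet?_neg_one]
        cases hgl : l.getLast? with
        | none => exact absurd (List.getLast?_eq_none_iff.mp hgl) hl
        | some p =>
          rw [hgl] at hlastTs
          simp at hlastTs
          simp [hlastTs]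
      cases rb
      · -- last run is non-speech
        simp only [if_pos rfl] at h2
        have hcs : (l.foldl (pvStepA mf) ([], none, 0)).2.1 = some (tss.headD 0) := by
          rw [h2]; simp
        have hc : (l.foldl (pvStepA mf) ([], none, 0)).2.2 = (tss.length : Int) := by
          rw [h2]; simp
        rw [hcs]
        simp only [hc, pvEmit, hfin]
        by_cases hge : ((tss.length : Int)) ≥ mf
        · simp [hge]
        · simp [hge]
      · -- last run is speech: no trailing region on either side
        simp only [Bool.true_eq_false, if_false] at h2
        have hcs : (l.foldl (pvStepA mf) ([], none, 0)).2.1 = none := by rw [h2]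
        rw [hcs]
        simp [pvEmit]

theorem pv_witness_ok :
    Dom_find_non_speech_regions pvWitness_find_non_speech_regions.1 pvWitness_find_non_speech_regions.2.1 pvWitness_find_non_speech_regions.2.2
    ∧ Pre_find_non_speech_regions pvWitness_find_non_speech_regions.1 pvWitness_find_non_speech_regions.2.1 pvWitness_find_non_speech_regions.2.2 := by
  constructor <;> decide
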